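-- pv_equiv track=rewrite | github.com/rhaxkd007-maker/IDS | ids 머신러닝XGBoost/src/dataset.py | _canonical_webattack
-- ===== SOURCE A (Python) =====
-- _BASE_MAPPING = {
--     "WEB ATTACK - BRUTE FORCE":"WebAttack-BruteForce",
--     "WEB ATTACK - XSS":"WebAttack-XSS",
--     "WEB ATTACK - SQL INJECTION":"WebAttack-SQLi",
--     "WEB ATTACK - SQL INJECTION.":"WebAttack-SQLi",
--     "WEB ATTACK - SQL":"WebAttack-SQLi",
--     "DOS HULK":"DoS Hulk","DOS SLOWLORIS":"DoS slowloris","DOS SLOWHTTPTEST":"DoS Slowhttptest",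
--     "DDOS":"DDoS","PORTSCAN":"PortScan","BOT":"Bot","INFILTRATION":"Infiltration",
--     "FTP-PATATOR":"FTP-Patator","SSH-PATATOR":"SSH-Patator","BENIGN":"BENIGN",
-- }
--
-- def _canonical_webattack(xu: str) -> str | None:
--     for k, v in _BASE_MAPPING.items():
--         if k.startswith("WEB ATTACK") and xu == k:
--             return v
--     if xu.startswith("WEB ATTACK"):
--         if   "BRUTE" in xu: return "WebAttack-BruteForce"
--         elif "XSS"   in xu: return "WebAttack-XSS"
--         elif "SQL"   in xu: return "WebAttack-SQLi"
--         return "WebAttack-Other"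
--     return None
-- ===== SOURCE B (Python) =====
-- def _canonical_webattack(xu: str) -> str | None:
--     # Single pass: the exact-key scan in A is subsumed by the substring rules.
--     if not xu.startswith("WEB ATTACK"):
--         return None
--     if "BRUTE" in xu:
--         return "WebAttack-BruteForce"
--     if "XSS" in xu:
--         return "WebAttack-XSS"
--     if "SQL" in xu:
--         return "WebAttack-SQLi"
--     return "WebAttack-Other"
-- ===== Notes on version B (the rewrite author's own statement) =====
-- stated objective: simpler
-- what changed: Removed A's exact-match scan over _BASE_MAPPING entirely (each WEB ATTACK key is classified identically by the substring rules) leaving a single guard-clause pass with no dictionary iteration.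
import Mathlib
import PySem

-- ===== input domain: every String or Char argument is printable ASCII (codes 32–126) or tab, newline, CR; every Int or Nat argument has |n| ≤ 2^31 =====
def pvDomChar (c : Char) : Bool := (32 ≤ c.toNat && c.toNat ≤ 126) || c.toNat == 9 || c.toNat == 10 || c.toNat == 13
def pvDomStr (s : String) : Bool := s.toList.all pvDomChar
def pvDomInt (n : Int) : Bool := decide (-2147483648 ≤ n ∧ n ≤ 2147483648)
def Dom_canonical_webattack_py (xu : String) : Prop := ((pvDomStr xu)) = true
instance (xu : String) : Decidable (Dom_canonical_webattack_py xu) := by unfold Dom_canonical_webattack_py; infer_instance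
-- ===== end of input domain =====

-- ===== PORT A =====
-- One honest line: B drops A's exact-match scan over _BASE_MAPPING (subsumed by the
-- substring rules) and is a single guard-clause pass; objective: simpler.
def pvBaseMapping : List (String × String) :=
  [("WEB ATTACK - BRUTE FORCE", "WebAttack-BruteForce"),
   ("WEB ATTACK - XSS", "WebAttack-XSS"),
   ("WEB ATTACK - SQL INJECTION", "WebAttack-SQLi"),
   ("WEB ATTACK - SQL INJECTION.", "WebAttack-SQLi"),
   ("WEB ATTACK - SQL", "WebAttack-SQLi"),
   ("DOS HULK", "DoS Hulk"), ("DOS SLOWLORIS", "DoS slowloris"),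
   ("DOS SLOWHTTPTEST", "DoS Slowhttptest"),
   ("DDOS", "DDoS"), ("PORTSCAN", "PortScan"), ("BOT", "Bot"),
   ("INFILTRATION", "Infiltration"), ("FTP-PATATOR", "FTP-Patator"),
   ("SSH-PATATOR", "SSH-Patator"), ("BENIGN", "BENIGN")]

-- the 'for k, v in _BASE_MAPPING.items(): if k.startswith("WEB ATTACK") and xu == k: return v' scan
def pvWebScan (xu : String) : List (String × String) → Option String
  | [] => none
  | (k, v) :: rest =>
    if PySem.Str.startswith k "WEB ATTACK" && xu == k then some v else pvWebScan xu rest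

def canonical_webattack_py (xu : String) : Option String :=
  match pvWebScan xu pvBaseMapping with
  | some v => some v
  | none =>
    if PySem.Str.startswith xu "WEB ATTACK" then
      if PySem.Str.isIn "BRUTE" xu then some "WebAttack-BruteForce"
      else if PySem.Str.isIn "XSS" xu then some "WebAttack-XSS"
      else if PySem.Str.isIn "SQL" xu then some "WebAttack-SQLi"
      else some "WebAttack-Other"
    else none

-- ===== PORT B =====
def canonical_webattack_py_alt (xu : String) : Option String :=
  if !PySem.Str.startswith xu "WEB ATTACK" then none
  else if PySem.Str.isIn "BRUTE" xu then some "WebAttack-BruteForce"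
  else if PySem.Str.isIn "XSS" xu then some "WebAttack-XSS"
  else if PySem.Str.isIn "SQL" xu then some "WebAttack-SQLi"
  else some "WebAttack-Other"

-- ===== PRECONDITION & SPEC =====
def Spec_canonical_webattack_py (xu : String) (out : Option String) : Prop := out = canonical_webattack_py_alt xu
instance (xu : String) (out : Option String) : Decidable (Spec_canonical_webattack_py xu out) := by unfold Spec_canonical_webattack_py; infer_instance

-- ===== CLAIM =====
def Claim_equal_canonical_webattack_py : Prop := ∀ (xu : String), Dom_canonical_webattack_py xu → Spec_canonical_webattack_py xu (canonical_webattack_py xu)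

-- ===== LEMMAS AND PROOFS =====
-- On each exact WEB ATTACK key the two ports agree (checked by evaluation);
-- on any other string the scan returns none and the two fallbacks coincide syntactically.
theorem canonical_webattack_eq (xu : String) :
    canonical_webattack_py xu = canonical_webattack_py_alt xu := by
  by_cases h1 : xu = "WEB ATTACK - BRUTE FORCE"
  · subst h1; decide
  by_cases h2 : xu = "WEB ATTACK - XSS"
  · subst h2; decide
  by_cases h3 : xu = "WEB ATTACK - SQL INJECTION"
  · subst h3; decide
  by_cases h4 : xu = "WEB ATTACK - SQL INJECTION."
  · subst h4; decide
  by_cases h5 : xu = "WEB ATTACK - SQL"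
  · subst h5; decide
  have hscan : pvWebScan xu pvBaseMapping = none := by
    simp [pvWebScan, pvBaseMapping, h1, h2, h3, h4, h5, PySem.Chars.startswith]
  simp only [canonical_webattack_py, canonical_webattack_py_alt, hscan]
  cases hs : PySem.Str.startswith xu "WEB ATTACK" <;> rfl

-- ===== VERDICT =====
theorem canonical_webattack_py_spec : Claim_equal_canonical_webattack_py := by
  intro xu _
  exact canonical_webattack_eq xu
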